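-- pv_equiv track=rewrite | github.com/ChihebEdine/kernel-dna-classification | kernels.py | k_substrings_embedding
-- ===== SOURCE A (Python) =====
-- def k_substrings_embedding(s, k=3):
--     """
--     computes an embedding for a given string s
--     number of occurences of all k substrings of s
--
--     Parameters
--     ----------
--         s : str
--             input string
--         k : int
--             number of charaters to consider
--
--     Returns
--     -------
--         Phi : dict (spectrum embedding of s)
--             the keys are k substrings of s
--             the values are the number of occurences of the keys in s
--     """
--     phi = {}
--     for i in range(len(s)-k+1):
--         sub = s[i:i+k]
--         if sub in phi:
--             phi[sub] += 1
--         else: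
--             phi[sub] = 1
--     return phi
-- ===== SOURCE B (Python) =====
-- def k_substrings_embedding(s, k=3):
--     """Sort-and-group instead of hash-and-increment: sort the list of all
--     k-windows, run-length encode the sorted list to get each window's count,
--     then emit the distinct windows in first-appearance order."""
--     subs = [s[i:i+k] for i in range(len(s)-k+1)]
--     cnt = {}
--     run = None
--     c = 0
--     for u in sorted(subs):
--         if u == run:
--             c += 1
--         else:
--             if run is not None:
--                 cnt[run] = c
--             run, c = u, 1
--     if run is not None:
--         cnt[run] = c
--     return {u: cnt.get(u, 0) for u in dict.fromkeys(subs)}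
-- ===== Notes on version B (the rewrite author's own statement) =====
-- stated objective: alternative
-- what changed: Replaces the hash-and-increment scan with sort-based counting: build the list of all k-windows, sort it, run-length encode the sorted list to obtain each window's count, then emit distinct windows in first-appearance order.
import Mathlib
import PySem

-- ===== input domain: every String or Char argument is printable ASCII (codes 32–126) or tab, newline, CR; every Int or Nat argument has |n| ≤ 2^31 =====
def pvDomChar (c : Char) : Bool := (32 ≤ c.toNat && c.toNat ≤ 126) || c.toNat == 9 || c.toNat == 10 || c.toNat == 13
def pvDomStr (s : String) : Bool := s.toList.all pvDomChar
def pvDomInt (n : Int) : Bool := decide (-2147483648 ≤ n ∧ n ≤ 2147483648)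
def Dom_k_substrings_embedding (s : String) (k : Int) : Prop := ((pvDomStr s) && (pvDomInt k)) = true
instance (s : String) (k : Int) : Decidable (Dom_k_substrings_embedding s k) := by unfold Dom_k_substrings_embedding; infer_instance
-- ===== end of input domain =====

-- B counts by sorting the k-windows and run-length encoding the sorted list instead of
-- A's hash-and-increment scan (alternative algorithm, not faster).

-- ===== PORT A =====
def k_substrings_embedding (s : String) (k : Int) : List (String × Int) :=
  let phi : PySem.Dict String Int :=
    (PySem.List.pyRange 0 ((PySem.Str.len s : Int) - k + 1) 1).foldl
      (fun phi i =>
        let sub := PySem.Str.slice s (some i) (some (i + k))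
        if phi.contains sub then
          phi.insert sub (phi.getD sub 0 + 1)     -- phi[sub] += 1
        else
          phi.insert sub 1)                       -- phi[sub] = 1
      PySem.Dict.empty
  phi.items

-- ===== PORT B =====
-- loop body of B's run-length pass: state = (cnt, run, c); `u == run` is False while run is None
def pvRLStep (st : PySem.Dict String Int × Option String × Int) (u : String) :
    PySem.Dict String Int × Option String × Int :=
  if some u == st.2.1 then (st.1, st.2.1, st.2.2 + 1)
  else ((match st.2.1 with | none => st.1 | some r => st.1.insert r st.2.2), some u, 1)

-- the trailing `if run is not None: cnt[run] = c` flush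
def pvRLFlush (st : PySem.Dict String Int × Option String × Int) : PySem.Dict String Int :=
  match st.2.1 with | none => st.1 | some r => st.1.insert r st.2.2

def k_substrings_embedding_alt (s : String) (k : Int) : List (String × Int) :=
  let subs := (PySem.List.pyRange 0 ((PySem.Str.len s : Int) - k + 1) 1).map
    (fun i => PySem.Str.slice s (some i) (some (i + k)))
  let cnt := pvRLFlush
    ((PySem.List.sorted subs (fun x => x) false).foldl pvRLStep (PySem.Dict.empty, none, 0))
  ((PySem.List.dedup subs).foldl (fun d u => d.insert u (cnt.getD u 0)) PySem.Dict.empty).items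

-- ===== PRECONDITION & SPEC =====
def Spec_k_substrings_embedding (s : String) (k : Int) (out : List (String × Int)) : Prop := out = k_substrings_embedding_alt s k
instance (s : String) (k : Int) (out : List (String × Int)) : Decidable (Spec_k_substrings_embedding s k out) := by unfold Spec_k_substrings_embedding; infer_instance

-- ===== CLAIM (what is proved, stated in full; the proofs are below) =====
def Claim_equal_k_substrings_embedding : Prop := ∀ (s : String) (k : Int), Dom_k_substrings_embedding s k → Spec_k_substrings_embedding s k (k_substrings_embedding s k)

-- ===== LEMMAS AND PROOFS =====

-- A's branch on `sub in phi` collapses: both branches are `insert sub (getD sub 0 + 1)`.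
theorem pv_branch_collapse (d : PySem.Dict String Int) (x : String) :
    (if d.contains x then d.insert x (d.getD x 0 + 1) else d.insert x 1)
      = d.insert x (d.getD x 0 + 1) := by
  by_cases h : d.contains x = true
  · simp [h]
  · simp only [Bool.not_eq_true] at h
    simp [h, PySem.Dict.getD_of_not_contains d 0 h]

-- run-length invariant: with the remaining input sorted, the flushed dict's entry for u
theorem pv_rl_getD (l : List String) (d : PySem.Dict String Int) (r : String) (c : Int)
    (u : String) (hp : (r :: l).Pairwise (· ≤ ·)) :
    (pvRLFlush (l.foldl pvRLStep (d, some r, c))).getD u 0 =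
      if u = r then c + (l.count u : Int)
      else if u ∈ l then (l.count u : Int) else d.getD u 0 := by
  induction l generalizing d r c with
  | nil =>
    simp only [List.foldl_nil, pvRLFlush, PySem.Dict.getD_insert, List.count_nil,
      List.not_mem_nil, if_false]
    split_ifs <;> simp
  | cons v l' ih =>
    by_cases hrv : r = v
    · subst hrv
      have hstep : pvRLStep (d, some r, c) r = (d, some r, c + 1) := by
        simp [pvRLStep]
      rw [List.foldl_cons, hstep, ih d r (c + 1) (hp.of_cons)]
      by_cases hur : u = r
      · subst hur
        simp only [List.count_cons_self]
        push_cast; ring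
      · simp [hur, Ne.symm hur, List.mem_cons]
    · have hstep : pvRLStep (d, some r, c) v = (d.insert r c, some v, 1) := by
        simp [pvRLStep, Ne.symm hrv]
      have hrlt : ∀ x ∈ v :: l', r < x := by
        intro x hx
        rcases List.mem_cons.mp hx with h | h
        · subst h; exact lt_of_le_of_ne (List.rel_of_pairwise_cons hp (List.mem_cons_self)) hrv
        · exact lt_of_le_of_ne
            (List.rel_of_pairwise_cons hp (List.mem_cons_of_mem _ h))
            (fun he => hrv (le_antisymm (List.rel_of_pairwise_cons hp List.mem_cons_self)
              (he ▸ List.rel_of_pairwise_cons hp.of_cons h)))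
      rw [List.foldl_cons, hstep, ih (d.insert r c) v 1 (hp.of_cons)]
      by_cases hur : u = r
      · subst hur
        have hnv : u ≠ v := hrv
        have hnl : u ∉ l' := fun h => lt_irrefl u (hrlt u (List.mem_cons_of_mem _ h))
        simp [hnv, hnl,
          List.count_eq_zero.mpr (fun h => lt_irrefl u (hrlt u h))]
      · by_cases huv : u = v
        · subst huv
          simp only [if_neg hur, List.mem_cons, true_or, if_true,
            List.count_cons_self]
          push_cast; ring
        · simp [hur, huv, Ne.symm huv, List.mem_cons, PySem.Dict.getD_insert]

-- the whole run-length pass computes every count of the (unsorted) window list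
theorem pv_cnt_getD (subs : List String) (u : String) :
    (pvRLFlush ((PySem.List.sorted subs (fun x => x) false).foldl pvRLStep
        (PySem.Dict.empty, none, 0))).getD u 0 = (subs.count u : Int) := by
  rcases h : PySem.List.sorted subs (fun x => x) false with _ | ⟨r, l⟩
  · have h0 : subs = [] := (PySem.List.sorted_eq_nil_iff subs (fun x => x) false).mp h
    subst h0
    simp [pvRLFlush]
  · have hperm : (r :: l).Perm subs := h ▸ PySem.List.sorted_perm subs (fun x => x) false
    have hpair : (r :: l).Pairwise (· ≤ ·) := by
      have := PySem.List.sorted_pairwise subs (fun x => x)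
      rw [h] at this; exact this
    have hstep : pvRLStep (PySem.Dict.empty, none, 0) r = (PySem.Dict.empty, some r, 1) := by
      simp [pvRLStep]
    rw [List.foldl_cons, hstep, pv_rl_getD l PySem.Dict.empty r 1 u hpair,
      ← hperm.count_eq]
    by_cases hur : u = r
    · subst hur
      simp only [List.count_cons_self]
      push_cast; ring
    · by_cases hul : u ∈ l
      · simp [hur, hul, Ne.symm hur]
      · simp [hur, hul, Ne.symm hur, List.count_eq_zero.mpr hul]

-- both passes of B together reproduce A's counter items, for any window list
theorem pv_main (subs : List String) :
    (subs.foldl (fun phi sub =>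
        if phi.contains sub then phi.insert sub (phi.getD sub 0 + 1) else phi.insert sub 1)
      PySem.Dict.empty).items
    = ((PySem.List.dedup subs).foldl (fun d u => d.insert u
        ((pvRLFlush ((PySem.List.sorted subs (fun x => x) false).foldl pvRLStep
          (PySem.Dict.empty, none, 0))).getD u 0)) PySem.Dict.empty).items := by
  rw [show subs.foldl (fun (phi : PySem.Dict String Int) sub =>
        if phi.contains sub then phi.insert sub (phi.getD sub 0 + 1) else phi.insert sub 1)
        PySem.Dict.empty
      = subs.foldl (fun phi sub => phi.insert sub (phi.getD sub 0 + 1)) PySem.Dict.empty from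
    PySem.List.foldl_congr_mem _ _ _ _ (fun acc x _ => pv_branch_collapse acc x)]
  rw [PySem.Dict.foldl_insert_getD_add_one_eq_counter, PySem.Dict.items_counter]
  rw [PySem.Dict.items_foldl_insert_fresh (l := PySem.List.dedup subs) (k := fun u => u)
      (v := fun u => ((pvRLFlush ((PySem.List.sorted subs (fun x => x) false).foldl pvRLStep
          (PySem.Dict.empty, none, 0))).getD u 0)) (d := PySem.Dict.empty)
      (fun a _ => PySem.Dict.contains_empty a) (by simp)]
  simp only [pv_cnt_getD, PySem.List.dedup_eq_ofList]
  rfl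

-- ===== VERDICT (by name: the statement is the Claim_ definition above) =====
theorem k_substrings_embedding_spec : Claim_equal_k_substrings_embedding := by
  intro s k _
  show k_substrings_embedding s k = k_substrings_embedding_alt s k
  exact (congrArg PySem.Dict.items
      (List.foldl_map (f := fun i => PySem.Str.slice s (some i) (some (i + k)))
        (g := fun (phi : PySem.Dict String Int) sub =>
          if phi.contains sub then phi.insert sub (phi.getD sub 0 + 1) else phi.insert sub 1)
        (l := PySem.List.pyRange 0 ((PySem.Str.len s : Int) - k + 1) 1)
        (init := PySem.Dict.empty))).symm.trans
    (pv_main _)
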